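-- pv_equiv track=rewrite | github.com/wherby/code | contest/00000c275d69/lc2022c2/q1/t1.py | temperatureTrend
-- ===== SOURCE A (Python) =====
-- def temperatureTrend(temperatureA, temperatureB):
--     """
--     :type temperatureA: List[int]
--     :type temperatureB: List[int]
--     :rtype: int
--     """
--     n = len(temperatureA)
--
--     def getArr(ls):
--         ret = []
--         for i in range(1,n):
--             if ls[i]> ls[i-1]:
--                 ret.append(1)
--             elif ls[i]<ls[i-1]:
--                 ret.append(-1)
--             else:
--                 ret.append(0)
--         return ret
--     lsa,lsb = getArr(temperatureA),getArr(temperatureB)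
--     mx =0
--     acc =0
--     for i in range(n-1):
--         if lsa[i] ==lsb[i]:
--             acc +=1
--             mx =max(mx,acc)
--         else:
--             acc =0
--     return mx
-- ===== SOURCE B (Python) =====
-- def temperatureTrend(temperatureA, temperatureB):
--     def sign(x, y):
--         return (y > x) - (y < x)
--     p = min(len(temperatureA), len(temperatureB)) - 1
--     if p < 0:
--         p = 0
--     cuts = [-1] + [j for j in range(p)
--                    if sign(temperatureA[j], temperatureA[j + 1])
--                       != sign(temperatureB[j], temperatureB[j + 1])] + [p]
--     gaps = [cuts[k + 1] - cuts[k] - 1 for k in range(len(cuts) - 1)]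
--     return max(gaps)
-- ===== Notes on version B (the rewrite author's own statement) =====
-- stated objective: alternative
-- what changed: B replaces A's running counter/reset scan over precomputed trend arrays by a cut-point formulation: it collects the indices where the two trend signs disagree and returns the largest gap between consecutive cut points (with sentinels), so no run-length accumulator is maintained.
-- outside the precondition, e.g. on temperatureTrend([1, 2, 3], [1, 2]): A raises IndexError, B returns 1
-- crash fix: When len(temperatureA) >= 2 and len(temperatureB) < len(temperatureA), A raises IndexError while indexing temperatureB; B returns the trend-match length over the common prefix (e.g. 1 on ([1,2,3],[1,2])). — e.g. on temperatureTrend([1, 2, 3], [1, 2]): A raises IndexError, B returns 1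
import Mathlib
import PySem

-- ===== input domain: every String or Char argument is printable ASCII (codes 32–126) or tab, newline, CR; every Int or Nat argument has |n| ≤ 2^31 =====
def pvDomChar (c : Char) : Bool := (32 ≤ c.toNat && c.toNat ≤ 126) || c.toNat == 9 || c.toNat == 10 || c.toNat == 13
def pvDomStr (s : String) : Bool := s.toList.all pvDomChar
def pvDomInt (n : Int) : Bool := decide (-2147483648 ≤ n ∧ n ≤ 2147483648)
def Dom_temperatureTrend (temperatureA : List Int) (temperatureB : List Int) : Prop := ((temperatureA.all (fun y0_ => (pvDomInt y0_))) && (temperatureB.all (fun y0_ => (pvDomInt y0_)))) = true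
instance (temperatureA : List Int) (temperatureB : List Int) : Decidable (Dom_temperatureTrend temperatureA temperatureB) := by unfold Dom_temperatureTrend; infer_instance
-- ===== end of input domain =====

-- B replaces A's running-counter scan over precomputed trend arrays by a cut-point formulation:
-- collect the indices where the trend signs disagree, return the largest gap between
-- consecutive cut points (with sentinels). Same O(n) cost, different algorithm (objective: alternative).

-- ===== PORT A =====
-- getArr: builds the trend array of ls w.r.t. n = len(temperatureA).
-- ls[i] / ls[i-1] raise IndexError when out of range; Pre_ excludes that, so the default 0 is never read.
def pvGetArr (n : Int) (ls : List Int) : List Int :=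
  (PySem.List.pyRange 1 n).foldl
    (fun ret i =>
      ret ++ (if PySem.List.pyGetD ls i 0 > PySem.List.pyGetD ls (i - 1) 0 then [(1 : Int)]
              else if PySem.List.pyGetD ls i 0 < PySem.List.pyGetD ls (i - 1) 0 then [(-1 : Int)]
              else [(0 : Int)])) []

def temperatureTrend (temperatureA : List Int) (temperatureB : List Int) : Int :=
  let n : Int := temperatureA.length
  let lsa := pvGetArr n temperatureA
  let lsb := pvGetArr n temperatureB
  -- for i in range(n-1): compare lsa[i] and lsb[i]; state (mx, acc)
  ((PySem.List.pyRange 0 (n - 1)).foldl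
    (fun (p : Int × Int) i =>
      if PySem.List.pyGetD lsa i 0 = PySem.List.pyGetD lsb i 0 then (max p.1 (p.2 + 1), p.2 + 1)
      else (p.1, 0)) (0, 0)).1

-- ===== PORT B =====
def pvSign (x y : Int) : Int :=
  (if y > x then 1 else 0) - (if y < x then 1 else 0)

def temperatureTrend_alt (temperatureA : List Int) (temperatureB : List Int) : Int :=
  let p0 : Int := min (temperatureA.length : Int) (temperatureB.length : Int) - 1
  let p : Int := if p0 < 0 then 0 else p0
  -- cuts = [-1] + [j for j in range(p) if sign(A[j],A[j+1]) != sign(B[j],B[j+1])] + [p]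
  let cuts : List Int :=
    [-1] ++ ((PySem.List.pyRange 0 p).filter (fun j =>
      !(pvSign (PySem.List.pyGetD temperatureA j 0) (PySem.List.pyGetD temperatureA (j + 1) 0)
        == pvSign (PySem.List.pyGetD temperatureB j 0) (PySem.List.pyGetD temperatureB (j + 1) 0)))) ++ [p]
  -- gaps = [cuts[k+1] - cuts[k] - 1 for k in range(len(cuts)-1)]
  let gaps : List Int := (PySem.List.pyRange 0 ((cuts.length : Int) - 1)).map (fun k =>
      PySem.List.pyGetD cuts (k + 1) 0 - PySem.List.pyGetD cuts k 0 - 1)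
  -- max(gaps); gaps is never empty (cuts has at least the two sentinels), so the default 0 is never read
  (PySem.List.max? gaps (fun x => x)).getD 0

-- ===== PRECONDITION & SPEC =====
-- Pre_ excludes exactly the inputs where A raises IndexError: len(temperatureA) ≥ 2 and
-- len(temperatureB) < len(temperatureA) (getArr(temperatureB) reads past temperatureB's end).
def Pre_temperatureTrend (temperatureA : List Int) (temperatureB : List Int) : Prop :=
  temperatureA.length ≤ 1 ∨ temperatureA.length ≤ temperatureB.length
instance (temperatureA : List Int) (temperatureB : List Int) : Decidable (Pre_temperatureTrend temperatureA temperatureB) := by unfold Pre_temperatureTrend; infer_instance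

def pvWitness_temperatureTrend : List Int × List Int := ([1, 2, 2, 0], [5, 6, 6, 1])

-- A raises IndexError when len(temperatureA) ≥ 2 and len(temperatureB) < len(temperatureA);
-- B returns the trend-match answer over the common prefix there.
def Raises_temperatureTrend (temperatureA : List Int) (temperatureB : List Int) : Prop :=
  2 ≤ temperatureA.length ∧ temperatureB.length < temperatureA.length
instance (temperatureA : List Int) (temperatureB : List Int) : Decidable (Raises_temperatureTrend temperatureA temperatureB) := by unfold Raises_temperatureTrend; infer_instance

def pvRaiseWitness_temperatureTrend : List Int × List Int := ([1, 2, 3], [1, 2])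
def pvRaiseWitnessOut_temperatureTrend : Int := 1

def Spec_temperatureTrend (temperatureA : List Int) (temperatureB : List Int) (out : Int) : Prop := out = temperatureTrend_alt temperatureA temperatureB
instance (temperatureA : List Int) (temperatureB : List Int) (out : Int) : Decidable (Spec_temperatureTrend temperatureA temperatureB out) := by unfold Spec_temperatureTrend; infer_instance

-- ===== CLAIM (what is proved, stated in full; the proofs are below) =====
def Claim_equal_temperatureTrend : Prop := ∀ (temperatureA : List Int) (temperatureB : List Int), Dom_temperatureTrend temperatureA temperatureB → Pre_temperatureTrend temperatureA temperatureB → Spec_temperatureTrend temperatureA temperatureB (temperatureTrend temperatureA temperatureB)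

def Claim_raises_temperatureTrend : Prop := (∀ (temperatureA : List Int) (temperatureB : List Int), Dom_temperatureTrend temperatureA temperatureB → Raises_temperatureTrend temperatureA temperatureB → ¬ Pre_temperatureTrend temperatureA temperatureB) ∧ (Dom_temperatureTrend (pvRaiseWitness_temperatureTrend.1) (pvRaiseWitness_temperatureTrend.2) ∧ Raises_temperatureTrend (pvRaiseWitness_temperatureTrend.1) (pvRaiseWitness_temperatureTrend.2) ∧ temperatureTrend_alt (pvRaiseWitness_temperatureTrend.1) (pvRaiseWitness_temperatureTrend.2) = pvRaiseWitnessOut_temperatureTrend)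

-- ===== LEMMAS AND PROOFS =====

-- A's loop state, abstracted over the list of per-position match flags
def pvStepA (p : Int × Int) (m : Bool) : Int × Int :=
  if m then (max p.1 (p.2 + 1), p.2 + 1) else (p.1, 0)

-- longest run of `true`, written as a recursion ("continue the run / close the run")
def pvR (acc : Int) : List Bool → Int
  | [] => acc
  | m :: ms => if m then pvR (acc + 1) ms else max acc (pvR 0 ms)

-- absolute positions of the `false` entries of ms, starting at index i
def pvFalsePos (i : Int) : List Bool → List Int
  | [] => []
  | m :: ms => (if m then [] else [i]) ++ pvFalsePos (i + 1) ms

-- consecutive gaps of a cut list (c - prev - 1 for each step)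
def pvGapList (prev : Int) : List Int → List Int
  | [] => []
  | c :: cs => (c - prev - 1) :: pvGapList c cs

-- max of a nonempty list (0 on [])
def pvMaxOf : List Int → Int
  | [] => 0
  | x :: t => t.foldl max x

-- the per-position match flags
def pvMatches (a b : List Int) : List Bool :=
  ((a.zip a.tail).zip (b.zip b.tail)).map (fun q => pvSign q.1.1 q.1.2 == pvSign q.2.1 q.2.2)

theorem pvGapList_length (cs : List Int) : ∀ prev, (pvGapList prev cs).length = cs.length := by
  induction cs with
  | nil => intro prev; simp [pvGapList]
  | cons c cs ih => intro prev; simp [pvGapList, ih]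

theorem pvR_ge (ms : List Bool) : ∀ acc : Int, acc ≤ pvR acc ms := by
  induction ms with
  | nil => intro acc; simp [pvR]
  | cons m ms ih =>
    intro acc
    cases m
    · rw [show pvR acc (false :: ms) = max acc (pvR 0 ms) from by simp [pvR]]
      omega
    · rw [show pvR acc (true :: ms) = pvR (acc + 1) ms from by simp [pvR]]
      have := ih (acc + 1); omega

theorem pvFoldA (ms : List Bool) : ∀ mx acc : Int, 0 ≤ acc → acc ≤ mx →
    (ms.foldl pvStepA (mx, acc)).1 = max mx (pvR acc ms) := by
  induction ms with
  | nil => intro mx acc _ h; simp [pvR]; omega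
  | cons m ms ih =>
    intro mx acc h0 h
    cases m
    · simp only [List.foldl_cons, pvStepA, Bool.false_eq_true, if_false, pvR]
      rw [ih mx 0 (le_refl 0) (by omega)]
      omega
    · simp only [List.foldl_cons, pvStepA, if_true, pvR]
      rw [ih (max mx (acc + 1)) (acc + 1) (by omega) (le_max_right _ _)]
      have := pvR_ge ms (acc + 1)
      omega

-- u.zip (v.take u.length) = u.zip v
theorem pv_zip_take_self {α β : Type} (u : List α) (v : List β) :
    u.zip (v.take u.length) = u.zip v := by
  induction u generalizing v with
  | nil => simp
  | cons x u ih => cases v with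
    | nil => simp
    | cons y v => simp [List.zip_cons_cons, ih]

-- getArr characterised: trends of ls over the first n elements, as a map over consecutive pairs
theorem pvGetArr_eq (n : Int) (ls : List Int) (h1 : 1 ≤ n) (h2 : n ≤ (ls.length : Int)) :
    pvGetArr n ls =
      ((ls.zip ls.tail).take (n - 1).toNat).map (fun q => pvSign q.1 q.2) := by
  unfold pvGetArr
  have hfun : (fun (ret : List Int) (i : Int) =>
      ret ++ (if PySem.List.pyGetD ls i 0 > PySem.List.pyGetD ls (i - 1) 0 then [(1 : Int)]
              else if PySem.List.pyGetD ls i 0 < PySem.List.pyGetD ls (i - 1) 0 then [(-1 : Int)]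
              else [(0 : Int)]))
      = fun (ret : List Int) (i : Int) =>
          ret ++ [pvSign (PySem.List.pyGetD ls (i - 1) 0) (PySem.List.pyGetD ls i 0)] := by
    funext ret i
    unfold pvSign
    split_ifs <;> simp <;> omega
  rw [hfun]
  rw [PySem.List.foldl_append_eq_flatMap
        (fun i => [pvSign (PySem.List.pyGetD ls (i - 1) 0) (PySem.List.pyGetD ls i 0)])]
  rw [List.nil_append, ← List.map_eq_flatMap, PySem.List.pyRange_one, List.map_map]
  apply List.ext_getElem
  · rw [List.length_map, List.length_map, List.length_range, List.length_take]
    rw [List.length_zip, List.length_tail]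
    omega
  · intro k hk1 hk2
    rw [List.getElem_map, List.getElem_map, List.getElem_range, List.getElem_take,
        List.getElem_zip]
    have hkn : k < (n - 1).toNat := by
      rw [List.length_map, List.length_range] at hk1; omega
    have hkl : k + 1 < ls.length := by omega
    simp only [Function.comp]
    have e2 : (1 : Int) + (k : Int) - 1 = (k : Int) := by omega
    rw [e2]
    rw [PySem.List.pyGetD_eq_getElem ls 0 (by omega) (by push_cast; omega)]
    rw [PySem.List.pyGetD_eq_getElem ls 0 (by omega) (by push_cast; omega)]
    have e1 : ((1 : Int) + (k : Int)).toNat = k + 1 := by omega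
    have e3 : ((k : Int)).toNat = k := by omega
    simp [e1, e3, List.getElem_tail]

-- A reduced to the fold of pvStepA over the match flags (main case, len a ≥ 2, len a ≤ len b)
theorem pvA_eq_fold (a b : List Int) (hn : 2 ≤ a.length) (hb : a.length ≤ b.length) :
    temperatureTrend a b = ((pvMatches a b).foldl pvStepA (0, 0)).1 := by
  unfold temperatureTrend
  dsimp only
  set n : Int := (a.length : Int) with hndef
  have h2n : 2 ≤ n := by omega
  have hA := pvGetArr_eq n a (by omega) (by omega)
  have hB := pvGetArr_eq n b (by omega) (by push_cast; omega)
  set m : Nat := (n - 1).toNat with hmdef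
  have hlenA : (a.zip a.tail).length = m := by
    simp [List.length_zip, List.length_tail]; omega
  have hlenB : m ≤ (b.zip b.tail).length := by
    simp [List.length_zip, List.length_tail]; omega
  have htakeA : (a.zip a.tail).take m = a.zip a.tail := by
    rw [List.take_of_length_le (by omega)]
  rw [hA, hB, htakeA] at *
  set lsa := (a.zip a.tail).map (fun q => pvSign q.1 q.2) with hlsa
  set lsb := ((b.zip b.tail).take m).map (fun q => pvSign q.1 q.2) with hlsb
  have hLa : lsa.length = m := by simp [hlsa, hlenA]
  have hLb : lsb.length = m := by simp [hlsb]; omega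
  set w := lsa.zip lsb with hw
  have hLw : w.length = m := by simp [hw, hLa, hLb]
  have hrange : n - 1 = (w.length : Int) := by omega
  rw [hrange]
  rw [PySem.List.foldl_congr_mem (PySem.List.pyRange 0 (w.length : Int))
    (fun (p : Int × Int) i =>
      if PySem.List.pyGetD lsa i 0 = PySem.List.pyGetD lsb i 0 then (max p.1 (p.2 + 1), p.2 + 1)
      else (p.1, 0))
    (fun (p : Int × Int) i =>
      if (PySem.List.pyGetD w i (0, 0)).1 = (PySem.List.pyGetD w i (0, 0)).2
      then (max p.1 (p.2 + 1), p.2 + 1) else (p.1, 0))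
    (0, 0) ?_]
  · rw [PySem.List.foldl_pyRange_zero_pyGetD' w (0, 0)
      (fun (p : Int × Int) (q : Int × Int) =>
        if q.1 = q.2 then (max p.1 (p.2 + 1), p.2 + 1) else (p.1, 0)) (0, 0)]
    have hzip : w = ((a.zip a.tail).zip (b.zip b.tail)).map
        (Prod.map (fun q => pvSign q.1 q.2) (fun q => pvSign q.1 q.2)) := by
      rw [hw, hlsa, hlsb, List.zip_map]
      congr 1
      rw [← hlenA, pv_zip_take_self]
    rw [hzip, List.foldl_map]
    unfold pvMatches
    rw [List.foldl_map]
    refine congrArg Prod.fst (PySem.List.foldl_congr_mem _ _ _ _ ?_)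
    intro acc x _
    simp only [Prod.map_fst, Prod.map_snd, pvStepA, beq_iff_eq]
    rfl
  · intro acc i hi
    dsimp only
    rw [PySem.List.mem_pyRange_one] at hi
    have hiw : i < (w.length : Int) := hi.2
    rw [PySem.List.pyGetD_eq_getElem w (0, 0) hi.1 (by omega)]
    rw [PySem.List.pyGetD_eq_getElem lsa 0 hi.1 (by rw [hLa, ← hLw]; omega)]
    rw [PySem.List.pyGetD_eq_getElem lsb 0 hi.1 (by rw [hLb, ← hLw]; omega)]
    simp [hw, List.getElem_zip]

-- B reduced to the max-gap of the cut list (main case)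
theorem pvMax?_getD (l : List Int) (h : l ≠ []) :
    (PySem.List.max? l (fun x => x)).getD 0 = pvMaxOf l := by
  cases l with
  | nil => exact absurd rfl h
  | cons x t => rw [PySem.List.max?_id_cons]; rfl

theorem pvGapList_getElem : ∀ (cs : List Int) (prev : Int) (k : Nat) (h : k < cs.length),
    (pvGapList prev cs)[k]'(by rw [pvGapList_length]; exact h) =
      (prev :: cs)[k + 1]'(by simpa using h) - (prev :: cs)[k]'(by simp; omega) - 1 := by
  intro cs
  induction cs with
  | nil => intro prev k h; simp at h
  | cons c cs ih =>
    intro prev k h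
    cases k with
    | zero => simp [pvGapList]
    | succ k =>
      have hk : k < cs.length := by simpa using h
      simp only [pvGapList]
      rw [List.getElem_cons_succ]
      rw [ih c k hk]
      simp

theorem pvFilter_eq (q : Int → Bool) (ms : List Bool) : ∀ i : Int,
    (∀ (k : Nat) (hk : k < ms.length), q (i + (k : Int)) = !ms[k]) →
    (PySem.List.pyRange i (i + (ms.length : Int))).filter q = pvFalsePos i ms := by
  induction ms with
  | nil =>
    intro i _
    have hnil : (PySem.List.pyRange i (i + ((([] : List Bool).length : Nat) : Int))) = [] := by
      apply PySem.List.pyRange_one_eq_nil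
      simp
    rw [hnil]
    rfl
  | cons m ms ih =>
    intro i hq
    rw [PySem.List.pyRange_one_cons (by simp)]
    rw [List.filter_cons]
    have h0 : q i = !m := by simpa using hq 0 (by simp)
    have hrest : (PySem.List.pyRange (i + 1) (i + (((m :: ms) : List Bool).length : Int))).filter q
        = pvFalsePos (i + 1) ms := by
      rw [show i + (((m :: ms) : List Bool).length : Int) = (i + 1) + (ms.length : Int) from by
        simp; omega]
      apply ih
      intro k hk
      have := hq (k + 1) (by simpa using Nat.succ_lt_succ hk)
      rw [show i + (((k + 1 : Nat)) : Int) = (i + 1) + (k : Int) from by push_cast; ring] at this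
      simpa using this
    rw [hrest, h0]
    cases m <;> simp [pvFalsePos]

theorem pvGaps_eq (rest : List Int) :
    (PySem.List.pyRange 0 ((((-1 : Int) :: rest).length : Int) - 1)).map (fun k =>
      PySem.List.pyGetD ((-1 : Int) :: rest) (k + 1) 0 -
        PySem.List.pyGetD ((-1 : Int) :: rest) k 0 - 1)
      = pvGapList (-1) rest := by
  apply List.ext_getElem
  · simp [PySem.List.length_pyRange_one, pvGapList_length]
  · intro k hk1 hk2
    have hkr : k < rest.length := by
      rw [pvGapList_length] at hk2; exact hk2
    rw [List.getElem_map, PySem.List.getElem_pyRange_one]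
    rw [PySem.List.pyGetD_eq_getElem _ 0 (by omega) (by push_cast; simp; omega)]
    rw [PySem.List.pyGetD_eq_getElem _ 0 (by omega) (by push_cast; simp; omega)]
    have e1 : (((0 : Int) + (k : Int)) + 1).toNat = k + 1 := by omega
    have e2 : ((0 : Int) + (k : Int)).toNat = k := by omega
    simp only [e1, e2]
    rw [pvGapList_getElem rest (-1) k hkr]

theorem pvB_eq_gaps (a b : List Int) (hn : 2 ≤ a.length) (hb : a.length ≤ b.length) :
    temperatureTrend_alt a b =
      pvMaxOf (pvGapList (-1) (pvFalsePos 0 (pvMatches a b) ++ [((a.length : Int) - 1)])) := by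
  unfold temperatureTrend_alt
  dsimp only
  have hp : (if (min (a.length : Int) (b.length : Int) - 1) < 0 then (0 : Int)
      else min (a.length : Int) (b.length : Int) - 1) = (a.length : Int) - 1 := by
    split_ifs <;> omega
  rw [hp]
  have hmslen : ((pvMatches a b).length : Int) = (a.length : Int) - 1 := by
    unfold pvMatches
    simp [List.length_zip, List.length_tail]
    omega
  have hfilter : (PySem.List.pyRange 0 ((a.length : Int) - 1)).filter (fun j =>
      !(pvSign (PySem.List.pyGetD a j 0) (PySem.List.pyGetD a (j + 1) 0)
        == pvSign (PySem.List.pyGetD b j 0) (PySem.List.pyGetD b (j + 1) 0)))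
      = pvFalsePos 0 (pvMatches a b) := by
    have hmain := pvFilter_eq (fun j =>
      !(pvSign (PySem.List.pyGetD a j 0) (PySem.List.pyGetD a (j + 1) 0)
        == pvSign (PySem.List.pyGetD b j 0) (PySem.List.pyGetD b (j + 1) 0)))
      (pvMatches a b) 0 ?_
    · rw [show (0 : Int) + (((pvMatches a b).length : Nat) : Int) = (a.length : Int) - 1 from by
        rw [hmslen]; ring] at hmain
      exact hmain
    · intro k hk
      have hkA : k + 1 < a.length := by omega
      have hkB : k + 1 < b.length := by omega
      dsimp only
      rw [PySem.List.pyGetD_eq_getElem a 0 (by omega) (by push_cast; omega)]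
      rw [PySem.List.pyGetD_eq_getElem a 0 (by omega) (by push_cast; omega)]
      rw [PySem.List.pyGetD_eq_getElem b 0 (by omega) (by push_cast; omega)]
      rw [PySem.List.pyGetD_eq_getElem b 0 (by omega) (by push_cast; omega)]
      have e1 : (((0 : Int) + (k : Int)) + 1).toNat = k + 1 := by omega
      have e2 : ((0 : Int) + (k : Int)).toNat = k := by omega
      simp only [e1, e2]
      simp [pvMatches, List.getElem_zip, List.getElem_tail]
  rw [hfilter]
  rw [show ([(-1 : Int)] ++ pvFalsePos 0 (pvMatches a b)) ++ [(a.length : Int) - 1]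
      = (-1 : Int) :: (pvFalsePos 0 (pvMatches a b) ++ [(a.length : Int) - 1]) from by simp]
  rw [pvGaps_eq (pvFalsePos 0 (pvMatches a b) ++ [(a.length : Int) - 1])]
  apply pvMax?_getD
  intro hnil
  have hh := pvGapList_length (pvFalsePos 0 (pvMatches a b) ++ [(a.length : Int) - 1]) (-1)
  rw [hnil] at hh
  simp at hh

theorem pv_foldl_max_comm (t : List Int) : ∀ x y : Int,
    t.foldl max (max x y) = max x (t.foldl max y) := by
  induction t with
  | nil => intro x y; simp
  | cons a t ih =>
    intro x y
    simp only [List.foldl_cons]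
    rw [max_assoc, ih]

theorem pvMaxOf_cons (x : Int) (l : List Int) (h : l ≠ []) :
    pvMaxOf (x :: l) = max x (pvMaxOf l) := by
  cases l with
  | nil => exact absurd rfl h
  | cons y t => simp only [pvMaxOf, List.foldl_cons]; rw [pv_foldl_max_comm]

-- the core: max gap between consecutive cut points = longest run of `true`
theorem pvCore (ms : List Bool) : ∀ i prev : Int, prev ≤ i →
    pvMaxOf (pvGapList prev (pvFalsePos i ms ++ [i + ms.length])) = pvR (i - prev - 1) ms := by
  induction ms with
  | nil =>
    intro i prev _
    simp [pvFalsePos, pvGapList, pvMaxOf, pvR]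
  | cons m ms ih =>
    intro i prev hpi
    cases m
    · have hlen : i + (((false :: ms) : List Bool).length : Int) = (i + 1) + (ms.length : Int) := by
        simp; omega
      rw [hlen]
      simp only [pvFalsePos, Bool.false_eq_true, if_false, List.cons_append, pvGapList, pvR]
      have hne : pvGapList i (pvFalsePos (i + 1) ms ++ [(i + 1) + (ms.length : Int)]) ≠ [] := by
        intro hc
        have := pvGapList_length (pvFalsePos (i + 1) ms ++ [(i + 1) + (ms.length : Int)]) i
        rw [hc] at this
        simp at this
      rw [List.nil_append, pvMaxOf_cons _ _ hne, ih (i + 1) i (by omega)]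
      have e0 : i + 1 - i - 1 = 0 := by omega
      rw [e0]
    · have hlen : i + (((true :: ms) : List Bool).length : Int) = (i + 1) + (ms.length : Int) := by
        simp; omega
      rw [hlen]
      simp only [pvFalsePos, if_true, List.nil_append, pvR]
      rw [ih (i + 1) prev (by omega)]
      have e1 : i + 1 - prev - 1 = (i - prev - 1) + 1 := by omega
      rw [e1]

-- degenerate case: len a ≤ 1 makes both programs return 0
theorem pvA_degenerate (a b : List Int) (h : a.length ≤ 1) : temperatureTrend a b = 0 := by
  unfold temperatureTrend
  dsimp only
  rw [PySem.List.pyRange_one_eq_nil (by omega : (a.length : Int) - 1 ≤ 0)]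
  rfl

theorem pvB_degenerate (a b : List Int) (h : a.length ≤ 1) : temperatureTrend_alt a b = 0 := by
  unfold temperatureTrend_alt
  dsimp only
  rw [show (if (min (a.length : Int) (b.length : Int) - 1) < 0 then (0 : Int)
        else min (a.length : Int) (b.length : Int) - 1) = 0 from by split_ifs <;> omega]
  rw [PySem.List.pyRange_one_eq_nil (le_refl 0), List.filter_nil]
  decide

-- ===== VERDICT (by name: the statement is the Claim_ definition above) =====
theorem temperatureTrend_spec : Claim_equal_temperatureTrend := by
  intro a b _ hpre
  unfold Spec_temperatureTrend
  by_cases hn : a.length ≤ 1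
  · rw [pvA_degenerate a b hn, pvB_degenerate a b hn]
  · push_neg at hn
    have hb : a.length ≤ b.length := by
      rcases hpre with h | h
      · omega
      · exact h
    rw [pvA_eq_fold a b (by omega) hb, pvB_eq_gaps a b (by omega) hb]
    rw [pvFoldA (pvMatches a b) 0 0 (le_refl 0) (le_refl 0)]
    have hms : ((pvMatches a b).length : Int) = (a.length : Int) - 1 := by
      unfold pvMatches
      simp [List.length_zip, List.length_tail]
      omega
    have hcore := pvCore (pvMatches a b) 0 (-1) (by omega)
    rw [hms, show (0 : Int) + ((a.length : Int) - 1) = (a.length : Int) - 1 from by ring,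
        show (0 : Int) - (-1) - 1 = 0 from by ring] at hcore
    rw [hcore]
    have := pvR_ge (pvMatches a b) 0
    omega

@[simp] theorem temperatureTrend_raises : Claim_raises_temperatureTrend := by
  unfold Claim_raises_temperatureTrend
  constructor
  · intro a b _ hr
    unfold Raises_temperatureTrend at hr
    unfold Pre_temperatureTrend
    omega
  · refine ⟨by decide, by decide, by decide⟩
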